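-- pv_equiv track=rewrite | github.com/DigitalHolography/HoloSegment | holosegment/segmentation/pulse_analysis.py | validate_peaks
-- ===== SOURCE A (Python) =====
-- def validate_peaks(sys_idx_list, min_distance):
--     """
--     Validate Peaks (Removes peaks that are too close)
--     Equivalent to MATLAB validate_peaks.
--     """
--
--     sys_idx_list = list(sys_idx_list)
--     i = 0
--
--     while i < len(sys_idx_list) - 1:
--         if sys_idx_list[i + 1] - sys_idx_list[i] < min_distance:
--             # remove next peak
--             sys_idx_list.pop(i + 1)
--         else:
--             i += 1
--
--     return sys_idx_list
-- ===== SOURCE B (Python) =====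
-- def validate_peaks(sys_idx_list, min_distance):
--     """Single greedy pass: keep a peak iff it is at least min_distance after the last kept peak."""
--     it = iter(sys_idx_list)
--     try:
--         last = next(it)
--     except StopIteration:
--         return []
--     kept = [last]
--     for x in it:
--         if x - last >= min_distance:
--             kept.append(x)
--             last = x
--     return kept
-- ===== Notes on version B (the rewrite author's own statement) =====
-- stated objective: faster
-- what changed: Replaces the while-loop that repeatedly pops the next-too-close element from the list (each pop shifting the tail) with a single greedy forward pass that appends to a new list while tracking the last kept peak.
import Mathlib
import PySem

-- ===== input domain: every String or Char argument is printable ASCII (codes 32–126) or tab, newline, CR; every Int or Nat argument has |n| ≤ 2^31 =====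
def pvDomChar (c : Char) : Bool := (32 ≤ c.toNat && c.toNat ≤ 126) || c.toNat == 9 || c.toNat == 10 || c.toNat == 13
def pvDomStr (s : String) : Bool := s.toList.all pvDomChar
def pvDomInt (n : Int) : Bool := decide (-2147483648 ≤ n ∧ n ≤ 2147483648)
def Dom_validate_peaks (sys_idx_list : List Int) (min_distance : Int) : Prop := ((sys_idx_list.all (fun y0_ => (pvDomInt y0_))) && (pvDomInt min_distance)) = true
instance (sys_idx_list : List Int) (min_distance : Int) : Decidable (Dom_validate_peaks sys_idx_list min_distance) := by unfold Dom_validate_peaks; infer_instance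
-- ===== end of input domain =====

-- B replaces A's quadratic pop-in-place while loop with one greedy pass tracking the last kept peak (objective: faster).

-- ===== PORT A =====
-- A's while loop: state is the (mutated) list and the index i; each step either pops
-- element i+1 (list shrinks) or advances i. In-range Python indexing ported via getD.
def validate_peaks_loopA (xs : List Int) (i : Nat) (d : Int) : List Int :=
  if _h : i + 1 < xs.length then
    if xs.getD (i + 1) 0 - xs.getD i 0 < d then
      validate_peaks_loopA (xs.eraseIdx (i + 1)) i d
    else
      validate_peaks_loopA xs (i + 1) d
  else xs
termination_by xs.length - i
decreasing_by
  · have : (xs.eraseIdx (i+1)).length = xs.length - 1 := by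
      rw [List.length_eraseIdx_of_lt _h]
    omega
  · omega

def validate_peaks (sys_idx_list : List Int) (min_distance : Int) : List Int :=
  validate_peaks_loopA sys_idx_list 0 min_distance

-- ===== PORT B =====
-- B's for-loop over the tail, tracking the last kept value; kept list built front-to-back.
def validate_peaks_loopB (last : Int) (rest : List Int) (d : Int) : List Int :=
  match rest with
  | [] => []
  | x :: t => if x - last ≥ d then x :: validate_peaks_loopB x t d
              else validate_peaks_loopB last t d

def validate_peaks_alt (sys_idx_list : List Int) (min_distance : Int) : List Int :=
  match sys_idx_list with
  | [] => []
  | x :: rest => x :: validate_peaks_loopB x rest min_distance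

-- ===== PRECONDITION & SPEC =====
def Spec_validate_peaks (sys_idx_list : List Int) (min_distance : Int) (out : List Int) : Prop := out = validate_peaks_alt sys_idx_list min_distance
instance (sys_idx_list : List Int) (min_distance : Int) (out : List Int) : Decidable (Spec_validate_peaks sys_idx_list min_distance out) := by unfold Spec_validate_peaks; infer_instance

-- ===== CLAIM (what is proved, stated in full; the proofs are below) =====
def Claim_equal_validate_peaks : Prop := ∀ (sys_idx_list : List Int) (min_distance : Int), Dom_validate_peaks sys_idx_list min_distance → Spec_validate_peaks sys_idx_list min_distance (validate_peaks sys_idx_list min_distance)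

-- ===== LEMMAS AND PROOFS =====

-- Invariant: with the list split as done ++ last :: rest and i = done.length,
-- A's loop returns done ++ last :: (B's greedy pass over rest).
theorem loopA_eq_loopB (rest : List Int) :
    ∀ (done : List Int) (last d : Int),
      validate_peaks_loopA (done ++ last :: rest) done.length d
        = done ++ last :: validate_peaks_loopB last rest d := by
  induction rest with
  | nil =>
    intro done last d
    rw [validate_peaks_loopA]
    simp [validate_peaks_loopB]
  | cons x t ih =>
    intro done last d
    rw [validate_peaks_loopA]
    have hlen : done.length + 1 < (done ++ last :: x :: t).length := by
      simp
    have h1 : (done ++ last :: x :: t).getD done.length 0 = last := by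
      simp
    have h2 : (done ++ last :: x :: t).getD (done.length + 1) 0 = x := by
      rw [List.getD_eq_getElem?_getD, List.getElem?_append_right (by omega)]
      simp
    have herase : (done ++ last :: x :: t).eraseIdx (done.length + 1) = done ++ last :: t := by
      have : done ++ last :: x :: t = (done ++ [last]) ++ x :: t := by simp
      rw [this]
      have : done.length + 1 = (done ++ [last]).length := by simp
      rw [this, List.eraseIdx_append_of_length_le (by simp)]
      simp
    rw [dif_pos hlen, h1, h2, herase]
    by_cases hc : x - last < d
    · rw [if_pos hc, ih done last d]
      simp [validate_peaks_loopB]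
      omega
    · rw [if_neg hc]
      have : done ++ last :: x :: t = (done ++ [last]) ++ x :: t := by simp
      rw [this]
      have hl : done.length + 1 = (done ++ [last]).length := by simp
      rw [hl, ih (done ++ [last]) x d]
      simp [validate_peaks_loopB]
      omega

-- ===== VERDICT (by name: the statement is the Claim_ definition above) =====
theorem validate_peaks_spec : Claim_equal_validate_peaks := by
  intro xs d _
  unfold Spec_validate_peaks validate_peaks validate_peaks_alt
  match xs with
  | [] => rw [validate_peaks_loopA]; simp
  | x :: rest => exact loopA_eq_loopB rest [] x d
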